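-- pv_equiv track=rewrite | github.com/ulelab/hnRNPH1_IR_MAF | scripts/process_maf_spliceai_v3.py | extract_window_around_position
-- ===== SOURCE A (Python) =====
-- def ungapped_position_to_gapped(sequence, ungapped_pos):
--     """
--     Convert an ungapped position (0-based) to a gapped position in the sequence
--     Ignores gaps (-, *, spaces) when counting
--     Returns: gapped position (0-based) or -1 if position is beyond sequence
--     """
--     if ungapped_pos < 0:
--         return -1
--
--     ungapped_count = 0
--     for i, char in enumerate(sequence):
--         if char not in ['-', '*', ' ', '\n', '\r']:
--             if ungapped_count == ungapped_pos:
--                 return i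
--             ungapped_count += 1
--
--     # Position is beyond the sequence
--     return -1
--
-- def extract_window_around_position(sequence, ungapped_pos, window_size=50):
--     """
--     Extract a window of size window_size (default 50) centered on ungapped_pos
--     The window will contain at least window_size ungapped nucleotides
--     Returns: (window_sequence, start_gapped_pos, end_gapped_pos)
--              Returns (None, -1, -1) if position is invalid or window cannot be extracted
--     """
--     if ungapped_pos < 0:
--         return (None, -1, -1)
--
--     # Find the gapped position corresponding to ungapped_pos
--     center_gapped = ungapped_position_to_gapped(sequence, ungapped_pos)
--     if center_gapped < 0:
--         return (None, -1, -1)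
--
--     # Calculate half window size (25 nt on each side)
--     half_window = window_size // 2
--
--     # Find start position: go back half_window ungapped positions
--     start_ungapped = max(0, ungapped_pos - half_window)
--     start_gapped = ungapped_position_to_gapped(sequence, start_ungapped)
--     if start_gapped < 0:
--         start_gapped = 0
--
--     # Find end position: go forward half_window ungapped positions
--     # First, find the total ungapped length
--     total_ungapped = sum(1 for c in sequence if c not in ['-', '*', ' ', '\n', '\r'])
--     end_ungapped = min(total_ungapped - 1, ungapped_pos + half_window)
--     end_gapped = ungapped_position_to_gapped(sequence, end_ungapped)
--     if end_gapped < 0: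
--         # If we can't find exact end, use sequence end
--         end_gapped = len(sequence)
--     else:
--         # Include the character at end_gapped
--         end_gapped += 1
--
--     # Extract window
--     window_sequence = sequence[start_gapped:end_gapped]
--
--     # Verify we have at least window_size ungapped nucleotides
--     # If not, try to extend the window
--     ungapped_in_window = sum(1 for c in window_sequence if c not in ['-', '*', ' ', '\n', '\r'])
--     if ungapped_in_window < window_size:
--         # Try to extend the window to get more ungapped nucleotides
--         # Extend backward first
--         while start_gapped > 0 and ungapped_in_window < window_size:
--             start_gapped -= 1
--             window_sequence = sequence[start_gapped:end_gapped]
--             ungapped_in_window = sum(1 for c in window_sequence if c not in ['-', '*', ' ', '\n', '\r'])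
--
--         # Then extend forward if needed
--         while end_gapped < len(sequence) and ungapped_in_window < window_size:
--             end_gapped += 1
--             window_sequence = sequence[start_gapped:end_gapped]
--             ungapped_in_window = sum(1 for c in window_sequence if c not in ['-', '*', ' ', '\n', '\r'])
--
--     return (window_sequence, start_gapped, end_gapped)
-- ===== SOURCE B (Python) =====
-- GAP_CHARS = ('-', '*', ' ', '\n', '\r')
--
-- def extract_window_around_position(sequence, ungapped_pos, window_size=50):
--     if ungapped_pos < 0:
--         return (None, -1, -1)
--     n = len(sequence)
--     # One pass: idx[j] = gapped index of the j-th ungapped char; pref[i] = ungapped chars in sequence[:i]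
--     idx = []
--     pref = [0] * (n + 1)
--     for i, c in enumerate(sequence):
--         if c not in GAP_CHARS:
--             idx.append(i)
--             pref[i + 1] = pref[i] + 1
--         else:
--             pref[i + 1] = pref[i]
--     total = len(idx)
--     if ungapped_pos >= total:
--         return (None, -1, -1)
--
--     half_window = window_size // 2
--     start_ungapped = max(0, ungapped_pos - half_window)
--     start_gapped = idx[start_ungapped] if start_ungapped < total else 0
--     end_ungapped = min(total - 1, ungapped_pos + half_window)
--     end_gapped = idx[end_ungapped] + 1 if end_ungapped >= 0 else n
--
--     def cnt(a, b):
--         return pref[b] - pref[a] if a < b else 0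
--
--     count = cnt(start_gapped, end_gapped)
--     while start_gapped > 0 and count < window_size:
--         start_gapped -= 1
--         count = cnt(start_gapped, end_gapped)
--     while end_gapped < n and count < window_size:
--         end_gapped += 1
--         count = cnt(start_gapped, end_gapped)
--
--     return (sequence[start_gapped:end_gapped], start_gapped, end_gapped)
-- ===== Notes on version B (the rewrite author's own statement) =====
-- stated objective: faster
-- what changed: Replaces A's repeated rescans (ungapped_position_to_gapped called three times, plus a full slice-recount on every step of the two extension loops) by one pass that builds an ungapped->gapped index array and a prefix-count array, so every position lookup and every window count during extension is O(1).
import Mathlib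
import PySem

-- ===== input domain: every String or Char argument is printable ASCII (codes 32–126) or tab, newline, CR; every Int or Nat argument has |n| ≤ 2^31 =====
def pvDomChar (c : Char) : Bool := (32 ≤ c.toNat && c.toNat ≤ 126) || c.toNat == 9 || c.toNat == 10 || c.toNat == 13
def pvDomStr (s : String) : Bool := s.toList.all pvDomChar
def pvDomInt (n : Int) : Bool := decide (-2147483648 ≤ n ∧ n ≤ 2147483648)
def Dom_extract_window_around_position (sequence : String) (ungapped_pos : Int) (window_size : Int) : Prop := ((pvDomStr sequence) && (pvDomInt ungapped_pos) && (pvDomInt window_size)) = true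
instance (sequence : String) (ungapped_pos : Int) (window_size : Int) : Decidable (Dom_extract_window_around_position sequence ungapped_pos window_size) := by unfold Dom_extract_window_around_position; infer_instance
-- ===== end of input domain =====

-- B replaces A's repeated rescans (three position scans and a full recount of the window
-- on every extension step) by a single pass building an index array and a prefix-count
-- array, so each lookup and window count is O(1); proved to return A's exact value.


-- ===== PORT A =====
-- char not in ['-', '*', ' ', '\n', '\r']
def pvKeep (c : Char) : Bool := !(c == '-' || c == '*' || c == ' ' || c == '\n' || c == '\r')

-- the for-loop of ungapped_position_to_gapped (i, ungapped_count carried explicitly)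
def pvU2gGo (pos : Int) : List Char → Int → Int → Int
  | [], _, _ => -1
  | c :: rest, i, cnt =>
    if pvKeep c then
      if cnt = pos then i else pvU2gGo pos rest (i + 1) (cnt + 1)
    else pvU2gGo pos rest (i + 1) cnt

def pvU2g (cs : List Char) (pos : Int) : Int :=
  if pos < 0 then -1 else pvU2gGo pos cs 0 0

-- sum(1 for c in cs if c not in [...])
def pvCountKeep (cs : List Char) : Int :=
  cs.foldl (fun a c => if pvKeep c then a + 1 else a) 0

-- A's backward extension while-loop (fuel = initial start_gapped, which it counts down to 0)
def pvABack (cs : List Char) (wsize endg : Int) : Nat → Int → Int → Int × Int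
  | 0, s, c => (s, c)
  | fuel + 1, s, c =>
    if 0 < s ∧ c < wsize then
      pvABack cs wsize endg fuel (s - 1) (pvCountKeep (PySem.List.slice cs (some (s - 1)) (some endg)))
    else (s, c)

-- A's forward extension while-loop (fuel = len(sequence) - initial end_gapped)
def pvAFwd (cs : List Char) (wsize startg : Int) : Nat → Int → Int → Int × Int
  | 0, e, c => (e, c)
  | fuel + 1, e, c =>
    if e < (cs.length : Int) ∧ c < wsize then
      pvAFwd cs wsize startg fuel (e + 1) (pvCountKeep (PySem.List.slice cs (some startg) (some (e + 1))))
    else (e, c)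

def extract_window_around_position (sequence : String) (ungapped_pos : Int) (window_size : Int) : Option String × Int × Int :=
  let cs := sequence.toList
  if ungapped_pos < 0 then (none, -1, -1)
  else
    let center := pvU2g cs ungapped_pos
    if center < 0 then (none, -1, -1)
    else
      let half := PySem.Int.floordiv window_size 2
      let startU := max 0 (ungapped_pos - half)
      let sg0 := pvU2g cs startU
      let sg1 := if sg0 < 0 then 0 else sg0
      let total := pvCountKeep cs
      let endU := min (total - 1) (ungapped_pos + half)
      let eg0 := pvU2g cs endU
      let eg1 := if eg0 < 0 then (cs.length : Int) else eg0 + 1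
      let cnt0 := pvCountKeep (PySem.List.slice cs (some sg1) (some eg1))
      if cnt0 < window_size then
        let bk := pvABack cs window_size eg1 sg1.toNat sg1 cnt0
        let fw := pvAFwd cs window_size bk.1 ((cs.length : Int) - eg1).toNat eg1 bk.2
        (some (String.ofList (PySem.List.slice cs (some bk.1) (some fw.1))), bk.1, fw.1)
      else (some (String.ofList (PySem.List.slice cs (some sg1) (some eg1))), sg1, eg1)

-- ===== PORT B =====
-- Source B's single pass: returns (idx, pref-tail); pref = 0 :: tail, idx = gapped positions of ungapped chars
def pvScanGo : List Char → Int → Int → List Int × List Int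
  | [], _, _ => ([], [])
  | c :: rest, i, p =>
    if pvKeep c then
      let t := pvScanGo rest (i + 1) (p + 1)
      (i :: t.1, (p + 1) :: t.2)
    else
      let t := pvScanGo rest (i + 1) p
      (t.1, p :: t.2)

-- Source B's cnt(a, b); indices are always in range in B, so the .getD 0 default is never used
def pvCnt (pref : List Int) (a b : Int) : Int :=
  if a < b then (PySem.List.pyGet? pref b).getD 0 - (PySem.List.pyGet? pref a).getD 0 else 0

-- Source B's backward while-loop (fuel = initial start_gapped)
def pvBBack (wsize : Int) (pref : List Int) (endg : Int) : Nat → Int → Int → Int × Int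
  | 0, s, c => (s, c)
  | fuel + 1, s, c =>
    if 0 < s ∧ c < wsize then
      pvBBack wsize pref endg fuel (s - 1) (pvCnt pref (s - 1) endg)
    else (s, c)

-- Source B's forward while-loop (fuel = n - initial end_gapped)
def pvBFwd (wsize : Int) (pref : List Int) (n startg : Int) : Nat → Int → Int → Int × Int
  | 0, e, c => (e, c)
  | fuel + 1, e, c =>
    if e < n ∧ c < wsize then
      pvBFwd wsize pref n startg fuel (e + 1) (pvCnt pref startg (e + 1))
    else (e, c)

def extract_window_around_position_alt (sequence : String) (ungapped_pos : Int) (window_size : Int) : Option String × Int × Int :=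
  let cs := sequence.toList
  if ungapped_pos < 0 then (none, -1, -1)
  else
    let n : Int := cs.length
    let scan := pvScanGo cs 0 0
    let idx := scan.1
    let pref : List Int := 0 :: scan.2
    let total : Int := idx.length
    if ungapped_pos ≥ total then (none, -1, -1)
    else
      let half := PySem.Int.floordiv window_size 2
      let startU := max 0 (ungapped_pos - half)
      let sg := if startU < total then (PySem.List.pyGet? idx startU).getD 0 else 0
      let endU := min (total - 1) (ungapped_pos + half)
      let eg := if 0 ≤ endU then (PySem.List.pyGet? idx endU).getD 0 + 1 else n
      let bk := pvBBack window_size pref eg sg.toNat sg (pvCnt pref sg eg)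
      let fw := pvBFwd window_size pref n bk.1 (n - eg).toNat eg bk.2
      (some (String.ofList (PySem.List.slice cs (some bk.1) (some fw.1))), bk.1, fw.1)

-- ===== PRECONDITION & SPEC =====
def Spec_extract_window_around_position (sequence : String) (ungapped_pos : Int) (window_size : Int) (out : Option String × Int × Int) : Prop := out = extract_window_around_position_alt sequence ungapped_pos window_size
instance (sequence : String) (ungapped_pos : Int) (window_size : Int) (out : Option String × Int × Int) : Decidable (Spec_extract_window_around_position sequence ungapped_pos window_size out) := by unfold Spec_extract_window_around_position; infer_instance

-- ===== CLAIM (what is proved, stated in full; the proofs are below) =====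
def Claim_equal_extract_window_around_position : Prop := ∀ (sequence : String) (ungapped_pos : Int) (window_size : Int), Dom_extract_window_around_position sequence ungapped_pos window_size → Spec_extract_window_around_position sequence ungapped_pos window_size (extract_window_around_position sequence ungapped_pos window_size)

-- ===== LEMMAS AND PROOFS =====

theorem pvCountKeep_eq (cs : List Char) : pvCountKeep cs = (cs.countP pvKeep : Int) := by
  simpa [pvCountKeep] using PySem.List.foldl_if_add_one pvKeep cs 0

theorem pvScanGo_fst_length (cs : List Char) : ∀ i p, ((pvScanGo cs i p).1).length = cs.countP pvKeep := by
  induction cs with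
  | nil => intro i p; simp [pvScanGo, List.countP_nil]
  | cons c rest ih =>
    intro i p
    cases h : pvKeep c <;> simp [pvScanGo, h, ih]

theorem pvScanGo_fst_bounds (cs : List Char) : ∀ i p x, x ∈ (pvScanGo cs i p).1 → i ≤ x ∧ x < i + cs.length := by
  induction cs with
  | nil => intro i p x hx; simp [pvScanGo] at hx
  | cons c rest ih =>
    intro i p x hx
    cases h : pvKeep c
    · simp only [pvScanGo, h, Bool.false_eq_true, if_false] at hx
      have := ih (i + 1) p x hx
      simp only [List.length_cons]
      omega
    · simp only [pvScanGo, h, if_true, List.mem_cons] at hx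
      rcases hx with rfl | hx
      · simp only [List.length_cons]; omega
      · have := ih (i + 1) (p + 1) x hx
        simp only [List.length_cons]
        omega

theorem pvU2gGo_eq (cs : List Char) : ∀ (i p pos cnt : Int),
    pvU2gGo pos cs i cnt =
      (if cnt ≤ pos then (((pvScanGo cs i p).1)[(pos - cnt).toNat]?).getD (-1) else -1) := by
  induction cs with
  | nil => intro i p pos cnt; simp [pvU2gGo, pvScanGo]
  | cons c rest ih =>
    intro i p pos cnt
    cases h : pvKeep c
    · have e1 : pvU2gGo pos (c :: rest) i cnt = pvU2gGo pos rest (i + 1) cnt := by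
        simp [pvU2gGo, h]
      have e2 : (pvScanGo (c :: rest) i p).1 = (pvScanGo rest (i + 1) p).1 := by
        simp [pvScanGo, h]
      rw [e1, e2, ih (i + 1) p pos cnt]
    · have e1 : pvU2gGo pos (c :: rest) i cnt
          = if cnt = pos then i else pvU2gGo pos rest (i + 1) (cnt + 1) := by
        simp [pvU2gGo, h]
      have e2 : (pvScanGo (c :: rest) i p).1 = i :: (pvScanGo rest (i + 1) (p + 1)).1 := by
        simp [pvScanGo, h]
      rw [e1, e2]
      by_cases he : cnt = pos
      · subst he
        rw [if_pos rfl, if_pos le_rfl]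
        simp
      · rw [if_neg he, ih (i + 1) (p + 1) pos (cnt + 1)]
        by_cases hle : cnt ≤ pos
        · have h1 : cnt + 1 ≤ pos := by omega
          have h2 : (pos - cnt).toNat = (pos - (cnt + 1)).toNat + 1 := by omega
          rw [if_pos h1, if_pos hle, h2, List.getElem?_cons_succ]
        · rw [if_neg (by omega), if_neg hle]

theorem pvU2g_eq (cs : List Char) (pos : Int) (hpos : 0 ≤ pos) :
    pvU2g cs pos = (((pvScanGo cs 0 0).1)[pos.toNat]?).getD (-1) := by
  rw [pvU2g, if_neg (by omega), pvU2gGo_eq cs 0 0 pos 0]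
  simp [hpos]

theorem pvScanGo_snd_get (cs : List Char) : ∀ i p k, k < cs.length →
    ((pvScanGo cs i p).2)[k]? = some (p + ((cs.take (k + 1)).countP pvKeep : Int)) := by
  induction cs with
  | nil => intro i p k hk; simp at hk
  | cons c rest ih =>
    intro i p k hk
    cases k with
    | zero =>
      cases h : pvKeep c <;>
        simp [pvScanGo, h, List.countP_nil]
    | succ k =>
      have hk' : k < rest.length := by simpa using hk
      cases h : pvKeep c
      · have e : (pvScanGo (c :: rest) i p).2 = p :: (pvScanGo rest (i + 1) p).2 := by
          simp [pvScanGo, h]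
        rw [e, List.getElem?_cons_succ, ih (i + 1) p k hk', List.take_succ_cons, List.countP_cons]
        simp [h]
      · have e : (pvScanGo (c :: rest) i p).2 = (p + 1) :: (pvScanGo rest (i + 1) (p + 1)).2 := by
          simp [pvScanGo, h]
        rw [e, List.getElem?_cons_succ, ih (i + 1) (p + 1) k hk', List.take_succ_cons, List.countP_cons]
        simp only [h, if_true, Option.some.injEq]
        push_cast
        ring

theorem pref_get (cs : List Char) (k : Nat) (hk : k ≤ cs.length) :
    (0 :: (pvScanGo cs 0 0).2)[k]? = some (((cs.take k).countP pvKeep : Int)) := by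
  cases k with
  | zero => simp
  | succ k =>
    rw [List.getElem?_cons_succ, pvScanGo_snd_get cs 0 0 k (by omega)]
    simp

theorem pyGet?_nonneg {α : Type} (xs : List α) (i : Int) (h : 0 ≤ i) :
    PySem.List.pyGet? xs i = xs[i.toNat]? := by
  obtain ⟨n, rfl⟩ := Int.eq_ofNat_of_zero_le h
  simp [PySem.List.pyGet?_natCast]

theorem pvCnt_eq (cs : List Char) (a b : Int) (ha : 0 ≤ a) (hb : 0 ≤ b) (hbn : b ≤ (cs.length : Int)) :
    pvCnt (0 :: (pvScanGo cs 0 0).2) a b = pvCountKeep (PySem.List.slice cs (some a) (some b)) := by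
  rw [pvCnt, PySem.List.slice_toNat cs ha hb, pvCountKeep_eq]
  by_cases hab : a < b
  · have han : a.toNat ≤ cs.length := by omega
    have hbn' : b.toNat ≤ cs.length := by omega
    rw [if_pos hab, pyGet?_nonneg _ a ha, pyGet?_nonneg _ b hb,
        pref_get cs a.toNat han, pref_get cs b.toNat hbn']
    have hdecomp : cs.take b.toNat = cs.take a.toNat ++ (cs.drop a.toNat).take (b.toNat - a.toNat) := by
      have h1 : b.toNat = a.toNat + (b.toNat - a.toNat) := by omega
      rw [h1, List.take_add]
      have h2 : a.toNat + (b.toNat - a.toNat) - a.toNat = b.toNat - a.toNat := by omega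
      rw [h2]
    have : (cs.take b.toNat).countP pvKeep
        = (cs.take a.toNat).countP pvKeep + ((cs.drop a.toNat).take (b.toNat - a.toNat)).countP pvKeep := by
      rw [hdecomp, List.countP_append]
    simp only [Option.getD_some]
    push_cast [this]
    ring
  · have : b.toNat - a.toNat = 0 := by omega
    simp [hab, this]

theorem pvBack_eq (cs : List Char) (w endg : Int) (he0 : 0 ≤ endg) (hen : endg ≤ (cs.length : Int)) :
    ∀ (fuel : Nat) (s c : Int),
      pvABack cs w endg fuel s c = pvBBack w (0 :: (pvScanGo cs 0 0).2) endg fuel s c := by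
  intro fuel
  induction fuel with
  | zero => intro s c; rfl
  | succ fuel ih =>
    intro s c
    by_cases h : 0 < s ∧ c < w
    · rw [pvABack, pvBBack, if_pos h, if_pos h, ih,
          pvCnt_eq cs (s - 1) endg (by omega) he0 hen]
    · rw [pvABack, pvBBack, if_neg h, if_neg h]

theorem pvFwd_eq (cs : List Char) (w startg : Int) (hs0 : 0 ≤ startg) :
    ∀ (fuel : Nat) (e c : Int), 0 ≤ e →
      pvAFwd cs w startg fuel e c = pvBFwd w (0 :: (pvScanGo cs 0 0).2) (cs.length : Int) startg fuel e c := by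
  intro fuel
  induction fuel with
  | zero => intro e c _; rfl
  | succ fuel ih =>
    intro e c he
    by_cases h : e < (cs.length : Int) ∧ c < w
    · rw [pvAFwd, pvBFwd, if_pos h, if_pos h, ih (e + 1) _ (by omega),
          pvCnt_eq cs startg (e + 1) hs0 (by omega) (by omega)]
    · rw [pvAFwd, pvBFwd, if_neg h, if_neg h]

theorem pvBBack_noop (w : Int) (pref : List Int) (endg : Int) (fuel : Nat) (s c : Int) (h : ¬ c < w) :
    pvBBack w pref endg fuel s c = (s, c) := by
  cases fuel with
  | zero => rfl
  | succ fuel => rw [pvBBack, if_neg (by tauto)]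

theorem pvBFwd_noop (w : Int) (pref : List Int) (n startg : Int) (fuel : Nat) (e c : Int) (h : ¬ c < w) :
    pvBFwd w pref n startg fuel e c = (e, c) := by
  cases fuel with
  | zero => rfl
  | succ fuel => rw [pvBFwd, if_neg (by tauto)]

theorem pvBBack_fst_nonneg (w : Int) (pref : List Int) (endg : Int) :
    ∀ (fuel : Nat) (s c : Int), 0 ≤ s → 0 ≤ (pvBBack w pref endg fuel s c).1 := by
  intro fuel
  induction fuel with
  | zero => intro s c hs; simpa [pvBBack]
  | succ fuel ih =>
    intro s c hs
    by_cases h : 0 < s ∧ c < w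
    · rw [pvBBack, if_pos h]; exact ih _ _ (by omega)
    · rw [pvBBack, if_neg h]; simpa

-- ===== VERDICT (by name: the statement is the Claim_ definition above) =====
theorem extract_window_around_position_spec : Claim_equal_extract_window_around_position := by
  intro sequence pos w _
  unfold Spec_extract_window_around_position extract_window_around_position extract_window_around_position_alt
  by_cases hneg : pos < 0
  · simp [hneg]
  · simp only [if_neg hneg]
    have hpos : 0 ≤ pos := by omega
    set cs := sequence.toList with hcs
    clear_value cs
    set idx := (pvScanGo cs 0 0).1 with hidx
    set pref := (0 : Int) :: (pvScanGo cs 0 0).2 with hpref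
    have hu2g : ∀ q : Int, 0 ≤ q → pvU2g cs q = (idx[q.toNat]?).getD (-1) := by
      intro q hq
      rw [hidx]
      exact pvU2g_eq cs q hq
    have htot : pvCountKeep cs = (idx.length : Int) := by
      rw [pvCountKeep_eq, hidx, pvScanGo_fst_length]
    have hmem : ∀ (j : Nat) (v : Int), idx[j]? = some v → 0 ≤ v ∧ v < (cs.length : Int) := by
      intro j v hj
      have hv : v ∈ idx := List.mem_of_getElem? hj
      rw [hidx] at hv
      have := pvScanGo_fst_bounds cs 0 0 v hv
      omega
    have hcnt : ∀ a b : Int, 0 ≤ a → 0 ≤ b → b ≤ (cs.length : Int) →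
        pvCnt pref a b = pvCountKeep (PySem.List.slice cs (some a) (some b)) := by
      intro a b ha hb hbn
      rw [hpref]
      exact pvCnt_eq cs a b ha hb hbn
    clear_value idx pref
    rw [htot]
    by_cases hge : (idx.length : Int) ≤ pos
    · have hnone : idx[pos.toNat]? = none := List.getElem?_eq_none (by omega)
      have hc : pvU2g cs pos = -1 := by rw [hu2g pos hpos, hnone]; rfl
      rw [hc, if_pos (by norm_num), if_pos (by omega)]
    · rw [not_le] at hge
      have hlt : pos.toNat < idx.length := by omega
      have hv : idx[pos.toNat]? = some idx[pos.toNat] := List.getElem?_eq_getElem hlt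
      have hcnn := hmem pos.toNat _ hv
      have hc : pvU2g cs pos = idx[pos.toNat] := by rw [hu2g pos hpos, hv]; rfl
      rw [hc, if_neg (show ¬idx[pos.toNat] < 0 by omega),
          if_neg (show ¬pos ≥ (idx.length : Int) by omega)]
      set half := PySem.Int.floordiv w 2 with hhalf
      clear_value half
      set startU := max 0 (pos - half) with hsu
      clear_value startU
      have hsu0 : 0 ≤ startU := by omega
      have hstart : (if pvU2g cs startU < 0 then 0 else pvU2g cs startU)
          = (if startU < (idx.length : Int) then (PySem.List.pyGet? idx startU).getD 0 else 0) := by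
        rw [hu2g startU hsu0, pyGet?_nonneg idx startU hsu0]
        by_cases h : startU < (idx.length : Int)
        · have hlt2 : startU.toNat < idx.length := by omega
          have hu : idx[startU.toNat]? = some idx[startU.toNat] := List.getElem?_eq_getElem hlt2
          have hb := hmem startU.toNat _ hu
          rw [hu]
          simp only [Option.getD_some]
          rw [if_neg (by omega), if_pos h]
        · have hn : idx[startU.toNat]? = none := List.getElem?_eq_none (by omega)
          rw [hn]
          simp only [Option.getD_none]
          rw [if_pos (by norm_num), if_neg h]
      rw [hstart]
      set sg := (if startU < (idx.length : Int) then (PySem.List.pyGet? idx startU).getD 0 else 0)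
        with hsg
      have hsg0 : 0 ≤ sg := by
        rw [hsg]
        split
        · rename_i h
          rw [pyGet?_nonneg idx startU hsu0]
          have hlt2 : startU.toNat < idx.length := by omega
          have hu : idx[startU.toNat]? = some idx[startU.toNat] := List.getElem?_eq_getElem hlt2
          rw [hu]
          exact (hmem _ _ hu).1
        · omega
      clear_value sg
      set endU := min ((idx.length : Int) - 1) (pos + half) with heu
      clear_value endU
      have hend : (if pvU2g cs endU < 0 then (cs.length : Int) else pvU2g cs endU + 1)
          = (if 0 ≤ endU then (PySem.List.pyGet? idx endU).getD 0 + 1 else (cs.length : Int)) := by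
        by_cases h : 0 ≤ endU
        · have hlt2 : endU.toNat < idx.length := by omega
          have hu : idx[endU.toNat]? = some idx[endU.toNat] := List.getElem?_eq_getElem hlt2
          have hb := hmem endU.toNat _ hu
          rw [hu2g endU h, pyGet?_nonneg idx endU h, hu]
          simp only [Option.getD_some]
          rw [if_neg (by omega), if_pos h]
        · have hc2 : pvU2g cs endU = -1 := by rw [pvU2g, if_pos (by omega)]
          rw [hc2, if_pos (by norm_num), if_neg h]
      rw [hend]
      set eg := (if 0 ≤ endU then (PySem.List.pyGet? idx endU).getD 0 + 1 else (cs.length : Int))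
        with heg
      have hegb : 0 ≤ eg ∧ eg ≤ (cs.length : Int) := by
        rw [heg]
        split
        · rename_i h
          rw [pyGet?_nonneg idx endU h]
          have hlt2 : endU.toNat < idx.length := by omega
          have hu : idx[endU.toNat]? = some idx[endU.toNat] := List.getElem?_eq_getElem hlt2
          rw [hu]
          have hb := hmem _ _ hu
          simp only [Option.getD_some]
          omega
        · simp
      clear_value eg
      have hc0 : pvCountKeep (PySem.List.slice cs (some sg) (some eg)) = pvCnt pref sg eg :=
        (hcnt sg eg hsg0 hegb.1 hegb.2).symm
      rw [hc0]
      by_cases hsmall : pvCnt pref sg eg < w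
      · rw [if_pos hsmall, hpref, pvBack_eq cs w eg hegb.1 hegb.2 sg.toNat sg _]
        have hbk0 : 0 ≤ (pvBBack w (0 :: (pvScanGo cs 0 0).2) eg sg.toNat sg
            (pvCnt (0 :: (pvScanGo cs 0 0).2) sg eg)).1 :=
          pvBBack_fst_nonneg w _ eg sg.toNat sg _ hsg0
        rw [pvFwd_eq cs w _ hbk0 (((cs.length : Int)) - eg).toNat eg _ hegb.1]
      · rw [if_neg hsmall]
        rw [hpref] at hsmall ⊢
        rw [pvBBack_noop w _ eg sg.toNat sg _ hsmall,
            pvBFwd_noop w _ (cs.length : Int) sg (((cs.length : Int)) - eg).toNat eg _ hsmall]
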